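-- pv_equiv track=rewrite | github.com/mitcysaraiva/ICproj | tools/generate_classifier_reports.py | _cond_slugs_from_condtag
-- ===== SOURCE A (Python) =====
-- def _cond_slugs_from_condtag(condtag: str) -> list[str]:
--     # Training names are formed by joining per-condition slugs with '_' and each condition here ends with '_ETOH'
--     parts = [p for p in condtag.split("_") if p]
--     out: list[str] = []
--     buf: list[str] = []
--     for p in parts:
--         buf.append(p)
--         if p.upper() == "ETOH":
--             out.append("_".join(buf))
--             buf = []
--     if buf:
--         # Fallback: treat whole string as one condition.
--         out = [condtag]
--     return out
-- ===== SOURCE B (Python) =====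
-- def _cond_slugs_from_condtag(condtag: str) -> list[str]:
--     # Index-then-slice: find ETOH boundary indices, slice between them.
--     parts = [p for p in condtag.split("_") if p]
--     if not parts:
--         return []
--     if parts[-1].upper() != "ETOH":
--         # Trailing tokens without an ETOH terminator: whole string is one condition.
--         return [condtag]
--     ends = [i for i, p in enumerate(parts) if p.upper() == "ETOH"]
--     out = []
--     start = 0
--     for e in ends:
--         out.append("_".join(parts[start:e + 1]))
--         start = e + 1
--     return out
-- ===== Notes on version B (the rewrite author's own statement) =====
-- stated objective: alternative
-- what changed: Replaces the streaming buffer-flush fold (append to buf, flush on ETOH, fallback via leftover buf) by an up-front fallback test on the last token plus computing all ETOH boundary indices and joining slices between consecutive boundaries.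
import Mathlib
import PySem

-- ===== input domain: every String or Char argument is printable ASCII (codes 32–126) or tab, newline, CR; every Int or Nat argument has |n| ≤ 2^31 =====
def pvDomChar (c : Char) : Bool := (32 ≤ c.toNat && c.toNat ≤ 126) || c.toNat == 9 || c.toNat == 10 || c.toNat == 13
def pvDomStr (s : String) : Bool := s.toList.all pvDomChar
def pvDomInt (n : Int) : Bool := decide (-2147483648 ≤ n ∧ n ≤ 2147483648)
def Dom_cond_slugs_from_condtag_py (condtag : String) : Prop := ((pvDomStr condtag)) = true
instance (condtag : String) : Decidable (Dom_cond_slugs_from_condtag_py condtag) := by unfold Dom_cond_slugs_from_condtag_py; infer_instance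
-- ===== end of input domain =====

-- B replaces A's streaming buffer-flush by an up-front fallback test plus ETOH boundary indices and slices (alternative decomposition, same cost).

-- ===== PORT A =====
def cond_slugs_from_condtag_py (condtag : String) : List String :=
  let parts := ((PySem.Str.split? condtag "_").getD []).filter (fun p => !(p == ""))
  let st := parts.foldl (fun (st : List String × List String) p =>
    let buf := st.2 ++ [p]
    if PySem.Str.upper p = "ETOH" then (st.1 ++ [PySem.Str.join "_" buf], ([] : List String))
    else (st.1, buf)) ([], [])
  if st.2 ≠ [] then [condtag] else st.1

-- ===== PORT B =====
def cond_slugs_from_condtag_py_alt (condtag : String) : List String :=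
  let parts := ((PySem.Str.split? condtag "_").getD []).filter (fun p => !(p == ""))
  match parts.getLast? with
  | none => []
  | some last =>
    if PySem.Str.upper last ≠ "ETOH" then [condtag]
    else
      let ends := (PySem.List.enumerate parts 0).filterMap
        (fun q => if PySem.Str.upper q.2 = "ETOH" then some q.1 else none)
      (ends.foldl (fun (st : List String × Int) e =>
        (st.1 ++ [PySem.Str.join "_" (PySem.List.slice parts (some st.2) (some (e + 1)))], e + 1))
        (([] : List String), (0 : Int))).1

-- ===== PRECONDITION & SPEC =====
def Spec_cond_slugs_from_condtag_py (condtag : String) (out : List String) : Prop := out = cond_slugs_from_condtag_py_alt condtag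
instance (condtag : String) (out : List String) : Decidable (Spec_cond_slugs_from_condtag_py condtag out) := by unfold Spec_cond_slugs_from_condtag_py; infer_instance

-- ===== CLAIM (what is proved, stated in full; the proofs are below) =====
def Claim_equal_cond_slugs_from_condtag_py : Prop := ∀ (condtag : String), Dom_cond_slugs_from_condtag_py condtag → Spec_cond_slugs_from_condtag_py condtag (cond_slugs_from_condtag_py condtag)

-- ===== LEMMAS AND PROOFS =====

-- groups of a parts list: buf++…++[ETOH-token] joined for each ETOH token, trailing leftover dropped
def pvSlugs : List String → List String → List String
  | _, [] => []
  | buf, p :: rest =>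
    if PySem.Str.upper p = "ETOH" then PySem.Str.join "_" (buf ++ [p]) :: pvSlugs [] rest
    else pvSlugs (buf ++ [p]) rest

-- the leftover buffer after processing
def pvFbuf : List String → List String → List String
  | buf, [] => buf
  | buf, p :: rest =>
    if PySem.Str.upper p = "ETOH" then pvFbuf [] rest else pvFbuf (buf ++ [p]) rest

theorem pvFoldA (rest : List String) : ∀ (out buf : List String),
    rest.foldl (fun (st : List String × List String) p =>
      let b := st.2 ++ [p]
      if PySem.Str.upper p = "ETOH" then (st.1 ++ [PySem.Str.join "_" b], ([] : List String))
      else (st.1, b)) (out, buf) = (out ++ pvSlugs buf rest, pvFbuf buf rest) := by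
  induction rest with
  | nil => intro out buf; simp [pvSlugs, pvFbuf]
  | cons p rest ih =>
    intro out buf
    simp only [List.foldl_cons, pvSlugs, pvFbuf]
    by_cases h : PySem.Str.upper p = "ETOH" <;> simp [h, ih]

theorem pvFbuf_nil_iff (rest : List String) : ∀ (p : String) (buf : List String),
    (pvFbuf buf (p :: rest) = [] ↔ PySem.Str.upper ((p :: rest).getLast (by simp)) = "ETOH") := by
  induction rest with
  | nil =>
    intro p buf
    by_cases h : PySem.Str.upper p = "ETOH" <;> simp [pvFbuf, h]
  | cons q rest ih =>
    intro p buf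
    rw [List.getLast_cons (by simp : q :: rest ≠ [])]
    show (if PySem.Str.upper p = "ETOH" then pvFbuf [] (q :: rest)
          else pvFbuf (buf ++ [p]) (q :: rest)) = [] ↔ _
    by_cases h : PySem.Str.upper p = "ETOH"
    · rw [if_pos h]; exact ih q []
    · rw [if_neg h]; exact ih q (buf ++ [p])

theorem pvFoldB (rest : List String) : ∀ (pre buf acc L : List String),
    L = pre ++ (buf ++ rest) →
    ∃ t : Int,
      (((PySem.List.enumerate rest ((pre.length + buf.length : Nat) : Int)).filterMap
          (fun q => if PySem.Str.upper q.2 = "ETOH" then some q.1 else none)).foldl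
        (fun (st : List String × Int) e =>
          (st.1 ++ [PySem.Str.join "_" (PySem.List.slice L (some st.2) (some (e + 1)))], e + 1))
        (acc, ((pre.length : Nat) : Int)))
      = (acc ++ pvSlugs buf rest, t) := by
  induction rest with
  | nil =>
    intro pre buf acc L _
    exact ⟨(pre.length : Int), by simp [PySem.List.enumerate, pvSlugs]⟩
  | cons p rest ih =>
    intro pre buf acc L hL
    rw [PySem.List.enumerate_cons]
    by_cases h : PySem.Str.upper p = "ETOH"
    · rw [List.filterMap_cons]
      simp only [h, reduceIte, List.foldl_cons, pvSlugs]
      have hslice : PySem.List.slice L (some ((pre.length : Nat) : Int))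
          (some (((pre.length + buf.length : Nat) : Int) + 1)) = buf ++ [p] := by
        have hc : (((pre.length + buf.length : Nat) : Int) + 1)
            = (((pre.length + buf.length + 1 : Nat)) : Int) := by push_cast; ring
        rw [hc, PySem.List.slice_natCast, hL]
        rw [List.drop_left]
        have harith : pre.length + buf.length + 1 - pre.length = buf.length + 1 := by omega
        rw [harith, List.take_append]
        simp
      have hcast : ((pre.length + buf.length : Nat) : Int) + 1
          = (((pre ++ buf ++ [p]).length : Nat) : Int) := by simp; ring
      obtain ⟨t, ht⟩ := ih (pre ++ buf ++ [p]) []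
        (acc ++ [PySem.Str.join "_" (buf ++ [p])]) L (by simp [hL])
      refine ⟨t, ?_⟩
      rw [hslice, hcast]
      have hcast2 : (((pre ++ buf ++ [p]).length + ([] : List String).length : Nat) : Int)
          = (((pre ++ buf ++ [p]).length : Nat) : Int) := by simp
      rw [hcast2] at ht
      rw [ht]
      simp
    · rw [List.filterMap_cons]
      simp only [h, reduceIte, pvSlugs]
      have hcast : ((pre.length + buf.length : Nat) : Int) + 1
          = ((pre.length + (buf ++ [p]).length : Nat) : Int) := by simp; ring
      rw [hcast]
      exact ih pre (buf ++ [p]) acc L (by simp [hL])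

-- ===== VERDICT (by name: the statement is the Claim_ definition above) =====
theorem cond_slugs_from_condtag_py_spec : Claim_equal_cond_slugs_from_condtag_py := by
  intro condtag _
  unfold Spec_cond_slugs_from_condtag_py cond_slugs_from_condtag_py cond_slugs_from_condtag_py_alt
  set parts := ((PySem.Str.split? condtag "_").getD []).filter (fun p => !(p == "")) with hp
  clear_value parts
  match parts with
  | [] => simp
  | p :: rest =>
    dsimp only
    rw [pvFoldA]
    rw [List.getLast?_eq_some_getLast (l := p :: rest) (by simp)]
    by_cases h : PySem.Str.upper ((p :: rest).getLast (by simp)) = "ETOH"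
    · have hb : pvFbuf [] (p :: rest) = [] := (pvFbuf_nil_iff rest p []).2 h
      obtain ⟨t, ht⟩ := pvFoldB (p :: rest) [] [] [] (p :: rest) (by simp)
      simp only [List.length_nil, Nat.cast_zero, List.nil_append, Nat.zero_add] at ht
      rw [PySem.List.enumerate_cons] at ht
      simp only [zero_add] at ht
      simp [hb, h, ht]
    · have hb : pvFbuf [] (p :: rest) ≠ [] := fun hc => h ((pvFbuf_nil_iff rest p []).1 hc)
      simp [hb, h]
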